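-- pv_equiv track=rewrite | github.com/Icln/Algorithm | 프로그래머스/1/12948. 핸드폰 번호 가리기/핸드폰 번호 가리기.py | solution
-- ===== SOURCE A (Python) =====
-- def solution(phone_number):
--     answer = ''
--
--     for i in range(len(phone_number)):
--         if i < len(phone_number) - 4:
--             answer += '*'
--         else:
--             answer += phone_number[i]
--     return answer
-- ===== SOURCE B (Python) =====
-- def solution(phone_number):
--     return '*' * (len(phone_number) - 4) + phone_number[-4:]
-- ===== Notes on version B (the rewrite author's own statement) =====
-- stated objective: simpler
-- what changed: Replaced the per-index loop with a branch by a closed form: a '*' repetition of length len-4 concatenated with the last-4 slice.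
import Mathlib
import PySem

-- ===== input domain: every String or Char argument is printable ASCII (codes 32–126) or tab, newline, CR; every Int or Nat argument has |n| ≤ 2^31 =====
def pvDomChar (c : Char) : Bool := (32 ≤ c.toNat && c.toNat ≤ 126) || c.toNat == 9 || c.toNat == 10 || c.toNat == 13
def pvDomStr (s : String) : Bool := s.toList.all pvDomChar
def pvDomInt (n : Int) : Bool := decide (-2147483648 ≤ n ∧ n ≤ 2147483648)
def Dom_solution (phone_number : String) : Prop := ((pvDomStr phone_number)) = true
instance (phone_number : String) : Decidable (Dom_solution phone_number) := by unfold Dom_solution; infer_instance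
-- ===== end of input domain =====

-- B replaces A's per-index loop and branch with a closed form: '*'-repetition of length len-4 plus the last-4 slice.


-- ===== PORT A =====
-- for i in range(len(pn)): answer += '*' if i < len-4 else pn[i]
def solution (phone_number : String) : String :=
  let l := phone_number.toList
  let answer : List Char :=
    (PySem.List.pyRange 0 (l.length : Int) 1).foldl
      (fun acc i =>
        if i < (l.length : Int) - 4 then acc ++ ['*']
        else acc ++ [PySem.List.pyGetD l i '?'])  -- index always in range inside the loop
      []
  String.mk answer

-- ===== PORT B =====
-- '*' * (len(pn) - 4) + pn[-4:]
def solution_alt (phone_number : String) : String :=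
  let l := phone_number.toList
  String.mk (List.replicate (l.length - 4) '*' ++ PySem.List.slice l (some (-4 : Int)) none)

-- ===== PRECONDITION & SPEC =====
def Spec_solution (phone_number : String) (out : String) : Prop := out = solution_alt phone_number
instance (phone_number : String) (out : String) : Decidable (Spec_solution phone_number out) := by unfold Spec_solution; infer_instance

-- ===== CLAIM (what is proved, stated in full; the proofs are below) =====
def Claim_equal_solution : Prop := ∀ (phone_number : String), Dom_solution phone_number → Spec_solution phone_number (solution phone_number)

-- ===== LEMMAS AND PROOFS =====

theorem pv_loop_eq_map (l : List Char) :
    (PySem.List.pyRange 0 (l.length : Int) 1).foldl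
      (fun acc i =>
        if i < (l.length : Int) - 4 then acc ++ ['*']
        else acc ++ [PySem.List.pyGetD l i '?']) []
     = (PySem.List.pyRange 0 (l.length : Int) 1).map
        (fun i => if i < (l.length : Int) - 4 then '*' else PySem.List.pyGetD l i '?') := by
  rw [show (fun acc (i : Int) =>
        if i < (l.length : Int) - 4 then acc ++ ['*']
        else acc ++ [PySem.List.pyGetD l i '?'])
      = (fun acc i => acc ++ [if i < (l.length : Int) - 4 then '*' else PySem.List.pyGetD l i '?'])
      from by funext acc i; split <;> rfl]
  rw [PySem.List.foldl_append_singleton_eq_map]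
  rfl

theorem pv_map_eq_closed (l : List Char) :
    (PySem.List.pyRange 0 (l.length : Int) 1).map
        (fun i => if i < (l.length : Int) - 4 then '*' else PySem.List.pyGetD l i '?')
     = List.replicate (l.length - 4) '*' ++ l.drop (l.length - 4) := by
  apply List.ext_getElem
  · simp only [List.length_map, List.length_append, List.length_replicate, List.length_drop, PySem.List.length_pyRange_one]; omega
  · intro i h1 h2
    simp only [List.length_map, PySem.List.length_pyRange_one] at h1
    have hi : i < l.length := by omega
    simp only [List.getElem_map, PySem.List.getElem_pyRange_one, zero_add]
    by_cases hc : i < l.length - 4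
    · rw [if_pos (by push_cast; omega)]
      rw [List.getElem_append_left (by simpa using hc)]
      simp
    · rw [if_neg (by push_cast; omega)]
      rw [List.getElem_append_right (by simpa using hc)]
      simp only [List.getElem_drop, List.length_replicate, PySem.List.pyGetD_natCast]
      rw [List.getD_eq_getElem l '?' (by omega)]
      congr 1
      omega

-- ===== VERDICT (by name: the statement is the Claim_ definition above) =====
theorem solution_spec : Claim_equal_solution := by
  intro pn _
  unfold Spec_solution solution solution_alt
  simp only
  rw [pv_loop_eq_map, pv_map_eq_closed,
      PySem.List.slice_from_neg_ofNat pn.toList 4 (by omega)]
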